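-- pv_equiv track=rewrite | github.com/protocol7/advent-of-code | aquaq/14/foo.py | foo
-- ===== SOURCE A (Python) =====
-- def foo(x, b):
--     for i, xx in enumerate(x):
--         for bb in b:
--             try:
--                 bb.remove(xx)
--
--                 if len(bb) == 0:
--                     # bingo!
--                     return i + 1
--
--             except ValueError:
--                 pass
-- ===== SOURCE B (Python) =====
-- # Faster exact re-implementation: precompute value -> draw positions once, then one
-- # pass per board (O(len(x) + total board size) instead of rescanning boards per draw).
-- # Note: unlike A, B does not mutate the boards in b (equivalence is about the return value).
-- # An empty board never wins (A only declares bingo after a successful removal), so B skips it.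
-- def foo(x, b):
--     pos = {}
--     for i, v in enumerate(x):
--         pos.setdefault(v, []).append(i)
--     best = None
--     for bb in b:
--         if not bb:
--             continue
--         cnt = {}
--         last = -1
--         ok = True
--         for v in bb:
--             c = cnt.get(v, 0)
--             occ = pos.get(v, [])
--             if c >= len(occ):
--                 ok = False
--                 break
--             if occ[c] > last:
--                 last = occ[c]
--             cnt[v] = c + 1
--         if ok:
--             done = last + 1
--             if best is None or done < best:
--                 best = done
--     return best
-- ===== Notes on version B (the rewrite author's own statement) =====
-- stated objective: faster
-- what changed: A simulates the draws one by one, rescanning and mutating every board per draw with list.remove; B precomputes a value->draw-positions dict in one pass over x, then for each board takes one counting pass to find the max needed position (its completion draw) and returns the min across boards.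
import Mathlib
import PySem

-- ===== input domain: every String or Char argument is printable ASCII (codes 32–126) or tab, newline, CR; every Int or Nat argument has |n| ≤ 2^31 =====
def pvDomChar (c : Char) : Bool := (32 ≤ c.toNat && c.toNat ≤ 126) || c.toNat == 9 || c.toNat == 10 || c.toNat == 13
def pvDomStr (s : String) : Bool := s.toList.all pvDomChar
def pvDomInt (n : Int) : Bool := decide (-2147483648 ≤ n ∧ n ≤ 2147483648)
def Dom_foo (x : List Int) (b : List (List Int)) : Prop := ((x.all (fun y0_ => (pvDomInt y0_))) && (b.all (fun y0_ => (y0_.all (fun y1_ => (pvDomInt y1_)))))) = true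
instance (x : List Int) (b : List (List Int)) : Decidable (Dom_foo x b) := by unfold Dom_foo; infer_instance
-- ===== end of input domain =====

-- B replaces A's draw-by-draw removal simulation by a value→positions index built once,
-- one pass per board, min across boards (measurably faster; A mutates the boards in b,
-- B does not — the equivalence proved here is about the return value).

-- ===== PORT A =====
-- inner 'for bb in b' loop for one draw xx: 'bb.remove(xx)' on each board
-- (ValueError → pass); returns none when a removal empties a board ('return i+1' fires),
-- otherwise the updated board list.
def fooInner (xx : Int) : List (List Int) → Option (List (List Int))
  | [] => some []
  | bb :: rest =>
    match PySem.List.remove? bb xx with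
    | none => (fooInner xx rest).map (bb :: ·)
    | some bb' =>
      if bb'.length = 0 then none
      else (fooInner xx rest).map (bb' :: ·)

-- outer 'for i, xx in enumerate(x)' loop; i is the running enumerate counter
def fooLoop : List Int → Int → List (List Int) → Option Int
  | [], _, _ => none
  | xx :: xs, i, bs =>
    match fooInner xx bs with
    | none => some (i + 1)
    | some bs' => fooLoop xs (i + 1) bs'

def foo (x : List Int) (b : List (List Int)) : Option Int := fooLoop x 0 b

-- ===== PORT B =====
-- pos = {}; for i, v in enumerate(x): pos.setdefault(v, []).append(i)
-- (setdefault(v, []).append(i) is exactly 'modify v [] (· ++ [i])')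
def altPos (x : List Int) : PySem.Dict Int (List Int) :=
  (PySem.List.enumerate x 0).foldl (fun d p => d.modify p.2 [] (· ++ [p.1])) PySem.Dict.empty

-- the 'for v in bb' loop: cnt counts how often v was seen in the board so far,
-- last is the largest draw position needed; none = 'ok = False' (break)
def altBoard (pos : PySem.Dict Int (List Int)) : List Int → PySem.Dict Int Int → Int → Option Int
  | [], _, last => some last
  | v :: rest, cnt, last =>
    let c := cnt.getD v 0
    let occ := pos.getD v []
    if c ≥ PySem.List.len occ then none
    else
      -- occ[c]: in range (0 ≤ c and c < len occ by the guard), so the default is never used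
      let p := PySem.List.pyGetD occ c 0
      altBoard pos rest (cnt.insert v (c + 1)) (if p > last then p else last)

def foo_alt (x : List Int) (b : List (List Int)) : Option Int :=
  let pos := altPos x
  b.foldl (fun best bb =>
    if bb = [] then best
    else
      match altBoard pos bb PySem.Dict.empty (-1) with
      | none => best
      | some last =>
        let done := last + 1
        match best with
        | none => some done
        | some m => if done < m then some done else best) none

-- ===== PRECONDITION & SPEC =====
def Spec_foo (x : List Int) (b : List (List Int)) (out : Option Int) : Prop := out = foo_alt x b
instance (x : List Int) (b : List (List Int)) (out : Option Int) : Decidable (Spec_foo x b out) := by unfold Spec_foo; infer_instance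

-- ===== CLAIM (what is proved, stated in full; the proofs are below) =====
def Claim_equal_foo : Prop := ∀ (x : List Int) (b : List (List Int)), Dom_foo x b → Spec_foo x b (foo x b)

-- ===== LEMMAS AND PROOFS =====

-- ghost: positions (0-based) of the occurrences of v in x
def occL (v : Int) : List Int → List Nat
  | [] => []
  | y :: ys => if y = v then 0 :: (occL v ys).map (· + 1) else (occL v ys).map (· + 1)

-- ghost: board bb is fully covered by the draws t (with multiplicity)
def covers (bb t : List Int) : Bool := bb.all (fun v => bb.count v ≤ t.count v)

-- ghost: least number of draws of x that covers bb
def W (x bb : List Int) : Option Nat :=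
  (List.range (x.length + 1)).find? (fun k => covers bb (x.take k))

-- ghost: running minimum of optional values (first-on-tie, like both folds)
def gmin {α : Type} [LinearOrder α] (best : Option α) (o : Option α) : Option α :=
  match o with
  | none => best
  | some k =>
    match best with
    | none => some k
    | some m => if k < m then some k else best

-- ghost: the common specification both ports are proved equal to
def spec (x : List Int) (bs : List (List Int)) : Option Nat :=
  bs.foldl (fun best bb => gmin best (if bb = [] then none else W x bb)) none

-- ghost: effect of one draw xx on one board in A
def stepB (xx : Int) (bb : List Int) : List Int := (PySem.List.remove? bb xx).getD bb

-- ghost: the counter dict altBoard has built after consuming the prefix pre of a board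
def cntOf (pre : List Int) : PySem.Dict Int Int :=
  pre.foldl (fun d w => d.insert w (d.getD w 0 + 1)) PySem.Dict.empty

theorem occL_length (v : Int) (x : List Int) : (occL v x).length = x.count v := by
  induction x with
  | nil => simp [occL]
  | cons y ys ih => by_cases h : y = v <;> simp [occL, h, ih]

theorem occL_lt_iff (v : Int) (x : List Int) (c j : Nat)
    (h : (occL v x)[c]? = some j) (k : Nat) : j < k ↔ c < (x.take k).count v := by
  induction x generalizing c j k with
  | nil => simp [occL] at h
  | cons y ys ih =>
    by_cases hy : y = v
    · simp only [occL, if_pos hy] at h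
      cases c with
      | zero =>
        simp at h
        subst h
        cases k with
        | zero => simp
        | succ k' => subst hy; simp [List.count_cons]
      | succ c' =>
        simp only [List.getElem?_cons_succ, List.getElem?_map] at h
        cases hj' : (occL v ys)[c']? with
        | none => simp [hj'] at h
        | some j' =>
          simp [hj'] at h
          subst h
          cases k with
          | zero => simp
          | succ k' =>
            subst hy
            simp only [List.take_succ_cons, List.count_cons_self]
            have := ih c' j' hj' k'
            omega
    · simp only [occL, if_neg hy, List.getElem?_map] at h
      cases hj' : (occL v ys)[c]? with
      | none => simp [hj'] at h
      | some j' =>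
        simp [hj'] at h
        subst h
        cases k with
        | zero => simp
        | succ k' =>
          have := ih c j' hj' k'
          simp [List.take_succ_cons, List.count_cons, hy]
          omega

theorem covers_iff (bb t : List Int) :
    covers bb t = true ↔ ∀ v ∈ bb, bb.count v ≤ t.count v := by
  simp [covers]

theorem covers_nil_of_ne (bb : List Int) (h : bb ≠ []) : covers bb [] = false := by
  cases bb with
  | nil => exact absurd rfl h
  | cons v t =>
    simp [covers]

theorem remove?_some_nil (bb : List Int) (xx : Int)
    (h : PySem.List.remove? bb xx = some []) : bb = [xx] := by
  have hmem : xx ∈ bb := by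
    by_contra hm
    rw [(PySem.List.remove?_eq_none_iff bb xx).mpr hm] at h; cases h
  rw [PySem.List.remove?_eq_some_erase bb xx hmem] at h
  have h2 : bb.erase xx = [] := by injection h
  have h3 := List.length_erase_of_mem hmem
  rw [h2] at h3
  cases bb with
  | nil => cases hmem
  | cons y ys =>
    cases ys with
    | nil => simp at hmem; rw [hmem]
    | cons z zs => simp at h3

theorem stepB_count (xx : Int) (bb : List Int) (v : Int) :
    (stepB xx bb).count v =
      if v = xx ∧ xx ∈ bb then bb.count v - 1 else bb.count v := by
  unfold stepB
  by_cases hm : xx ∈ bb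
  · rw [PySem.List.remove?_eq_some_erase bb xx hm]
    by_cases hv : v = xx
    · subst hv; simp [hm, List.count_erase_self]
    · simp [hv, List.count_erase_of_ne hv]
  · rw [(PySem.List.remove?_eq_none_iff bb xx).mpr hm]
    simp [hm]

theorem stepB_mem (xx : Int) (bb : List Int) (v : Int) (h : v ∈ stepB xx bb) : v ∈ bb := by
  unfold stepB at h
  by_cases hm : xx ∈ bb
  · rw [PySem.List.remove?_eq_some_erase bb xx hm] at h
    exact List.mem_of_mem_erase h
  · rwa [(PySem.List.remove?_eq_none_iff bb xx).mpr hm] at h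

theorem stepB_mem_of_ne (xx : Int) (bb : List Int) (v : Int) (hne : v ≠ xx)
    (h : v ∈ bb) : v ∈ stepB xx bb := by
  unfold stepB
  by_cases hm : xx ∈ bb
  · rw [PySem.List.remove?_eq_some_erase bb xx hm]
    simpa [List.mem_erase_of_ne hne]
  · rwa [(PySem.List.remove?_eq_none_iff bb xx).mpr hm]

theorem covers_step (xx : Int) (bb t : List Int) :
    covers bb (xx :: t) = covers (stepB xx bb) t := by
  rw [Bool.eq_iff_iff, covers_iff, covers_iff]
  constructor
  · intro H v hv
    have hvb := stepB_mem xx bb v hv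
    have hH := H v hvb
    rw [stepB_count]
    by_cases hveq : v = xx
    · subst hveq
      rw [List.count_cons_self] at hH
      rw [if_pos ⟨rfl, hvb⟩]
      omega
    · rw [if_neg (by tauto)]
      simpa [List.count_cons, Ne.symm hveq] using hH
  · intro H v hvb
    by_cases hveq : v = xx
    · subst hveq
      rw [List.count_cons_self]
      have hpos : 0 < bb.count v := List.count_pos_iff.mpr hvb
      by_cases hs : v ∈ stepB v bb
      · have hh := H v hs
        rw [stepB_count, if_pos ⟨rfl, hvb⟩] at hh
        omega
      · have h0 : (stepB v bb).count v = 0 := List.count_eq_zero.mpr hs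
        rw [stepB_count, if_pos ⟨rfl, hvb⟩] at h0
        omega
    · have hvs := stepB_mem_of_ne xx bb v hveq hvb
      have hh := H v hvs
      rw [stepB_count, if_neg (by tauto)] at hh
      simpa [List.count_cons, Ne.symm hveq] using hh

theorem covers_mono (bb x : List Int) (j k : Nat) (hjk : j ≤ k)
    (h : covers bb (x.take j) = true) : covers bb (x.take k) = true := by
  rw [covers_iff] at h ⊢
  intro v hv
  exact le_trans (h v hv)
    (List.Sublist.count_le v (List.take_prefix_take_left hjk).sublist)

theorem find?_range_eq_some_of (p : Nat → Bool) (K n : Nat) (hK : K < n)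
    (hp : p K = true) (hmin : ∀ j < K, p j = false) :
    (List.range n).find? p = some K := by
  obtain ⟨m, rfl⟩ : ∃ m, n = (K + 1) + m := ⟨n - (K+1), by omega⟩
  rw [List.range_add, List.find?_append]
  have h1 : (List.range (K + 1)).find? p = some K := by
    rw [List.range_succ, List.find?_append]
    have hn : (List.range K).find? p = none :=
      List.find?_eq_none.mpr (fun j hj => by
        simp [hmin j (List.mem_range.mp hj)])
    rw [hn]
    simp [hp]
  rw [h1]
  rfl

theorem W_pos (x bb : List Int) (h : bb ≠ []) (k : Nat) (hW : W x bb = some k) : 1 ≤ k := by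
  have hp := List.find?_some hW
  cases k with
  | zero => rw [List.take_zero, covers_nil_of_ne bb h] at hp; cases hp
  | succ k' => omega

theorem W_none (x bb : List Int) (h : covers bb x = false) : W x bb = none := by
  unfold W
  refine List.find?_eq_none.mpr (fun k hk => ?_)
  intro hc
  have hk' : k ≤ x.length := by have := List.mem_range.mp hk; omega
  have := covers_mono bb x k x.length hk' hc
  rw [List.take_length] at this
  rw [this] at h
  cases h

theorem W_hit (xx : Int) (xs : List Int) : W (xx :: xs) [xx] = some 1 := by
  unfold W
  apply find?_range_eq_some_of _ 1 _ (by simp)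
  · simp [covers]
  · intro j hj
    have : j = 0 := by omega
    subst this
    exact covers_nil_of_ne [xx] (by simp)

theorem W_shift (xx : Int) (xs bb : List Int) (h0 : bb ≠ []) (h1 : bb ≠ [xx]) :
    W (xx :: xs) bb = (W xs (stepB xx bb)).map (· + 1) ∧ stepB xx bb ≠ [] := by
  constructor
  · unfold W
    have hlen : (xx :: xs).length + 1 = (xs.length + 1) + 1 := by simp
    rw [hlen, List.range_succ_eq_map]
    rw [List.find?_cons_of_neg (by simp [covers_nil_of_ne bb h0])]
    rw [List.find?_map]
    have hfun : ((fun k => covers bb ((xx :: xs).take k)) ∘ Nat.succ)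
        = fun k => covers (stepB xx bb) (xs.take k) := by
      funext k
      simp only [Function.comp, List.take_succ_cons]
      exact covers_step xx bb (xs.take k)
    rw [hfun]
  · intro hnil
    unfold stepB at hnil
    cases hr : PySem.List.remove? bb xx with
    | none => rw [hr] at hnil; exact h0 hnil
    | some bb' =>
      rw [hr] at hnil
      simp at hnil
      subst hnil
      exact h1 (remove?_some_nil bb xx hr)

theorem fooInner_none_iff (xx : Int) (bs : List (List Int)) :
    fooInner xx bs = none ↔ [xx] ∈ bs := by
  induction bs with
  | nil => simp [fooInner]
  | cons bb rest ih =>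
    simp only [fooInner]
    cases hr : PySem.List.remove? bb xx with
    | none =>
      simp only [Option.map_eq_none_iff, ih, List.mem_cons]
      constructor
      · exact Or.inr
      · rintro (h | h)
        · subst h
          rw [PySem.List.remove?_cons_self] at hr
          cases hr
        · exact h
    | some bb' =>
      by_cases hb : bb'.length = 0
      · simp only [if_pos hb]
        have : bb' = [] := List.length_eq_zero_iff.mp hb
        subst this
        have := remove?_some_nil bb xx hr
        subst this
        simp
      · simp only [if_neg hb, Option.map_eq_none_iff, ih, List.mem_cons]
        constructor
        · exact Or.inr
        · rintro (h | h)
          · subst h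
            rw [PySem.List.remove?_cons_self] at hr
            injection hr with hr'
            subst hr'
            simp at hb
          · exact h

theorem fooInner_some (xx : Int) (bs : List (List Int)) (h : [xx] ∉ bs) :
    fooInner xx bs = some (bs.map (stepB xx)) := by
  induction bs with
  | nil => simp [fooInner]
  | cons bb rest ih =>
    have hbb : bb ≠ [xx] := fun he => h (he ▸ List.mem_cons_self)
    have hrest : [xx] ∉ rest := fun he => h (List.mem_cons_of_mem _ he)
    simp only [fooInner, List.map_cons]
    cases hr : PySem.List.remove? bb xx with
    | none =>
      rw [ih hrest]
      simp [stepB, hr]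
    | some bb' =>
      have hb : bb'.length ≠ 0 := by
        intro h0
        have : bb' = [] := List.length_eq_zero_iff.mp h0
        subst this
        exact hbb (remove?_some_nil bb xx hr)
      simp only [if_neg hb, ih hrest]
      simp [stepB, hr]

theorem gmin_fold_map {α β γ : Type} [LinearOrder α] [LinearOrder β] (φ : α → β)
    (hφ : ∀ a b : α, φ a < φ b ↔ a < b)
    (l : List γ) (f : γ → Option α) (g : γ → Option β)
    (hfg : ∀ c ∈ l, g c = (f c).map φ) (acc : Option α) :
    l.foldl (fun best c => gmin best (g c)) (acc.map φ)
      = (l.foldl (fun best c => gmin best (f c)) acc).map φ := by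
  induction l generalizing acc with
  | nil => simp
  | cons c rest ih =>
    simp only [List.foldl_cons]
    have hstep : gmin (acc.map φ) (g c) = (gmin acc (f c)).map φ := by
      rw [hfg c List.mem_cons_self]
      cases f c with
      | none => simp [gmin]
      | some k =>
        cases acc with
        | none => simp [gmin]
        | some m =>
          simp only [Option.map_some, gmin]
          by_cases hlt : k < m
          · rw [if_pos ((hφ k m).mpr hlt), if_pos hlt]; simp
          · rw [if_neg (fun hc => hlt ((hφ k m).mp hc)), if_neg hlt]; simp
    rw [hstep]
    apply ih
    exact fun c' hc' => hfg c' (List.mem_cons_of_mem _ hc')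

theorem gmin_fold_one {γ : Type} (l : List γ) (f : γ → Option Nat) (acc : Option Nat)
    (hall : ∀ c ∈ l, ∀ k, f c = some k → 1 ≤ k)
    (hacc : ∀ m, acc = some m → 1 ≤ m)
    (hone : (∃ c ∈ l, f c = some 1) ∨ acc = some 1) :
    l.foldl (fun best c => gmin best (f c)) acc = some 1 := by
  induction l generalizing acc with
  | nil =>
    rcases hone with ⟨c, hc, _⟩ | h
    · cases hc
    · simpa using h
  | cons c rest ih =>
    simp only [List.foldl_cons]
    apply ih
    · exact fun c' hc' => hall c' (List.mem_cons_of_mem _ hc')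
    · -- gmin acc (f c) is none-or ≥ 1
      intro m hm
      cases hfc : f c with
      | none =>
        rw [hfc] at hm
        exact hacc m hm
      | some k =>
        have hk := hall c List.mem_cons_self k hfc
        rw [hfc] at hm
        cases acc with
        | none => simp [gmin] at hm; omega
        | some m' =>
          have hm' := hacc m' rfl
          simp only [gmin] at hm
          split at hm <;> simp at hm <;> omega
    · -- some 1 still present
      rcases hone with ⟨c', hc', hf1⟩ | h
      · rcases List.mem_cons.mp hc' with he | hmem
        · subst he
          right
          rw [hf1]
          cases acc with
          | none => simp [gmin]
          | some m' =>
            have hm' := hacc m' rfl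
            simp only [gmin]
            split <;> simp_all <;> omega
        · exact Or.inl ⟨c', hmem, hf1⟩
      · right
        rw [h]
        cases hfc : f c with
        | none => simp [gmin]
        | some k =>
          have hk := hall c List.mem_cons_self k hfc
          simp only [gmin]
          split <;> simp_all

theorem gmin_fold_none {γ : Type} (l : List γ) (f : γ → Option Nat) (acc : Option Nat)
    (hall : ∀ c ∈ l, f c = none) :
    l.foldl (fun best c => gmin best (f c)) acc = acc := by
  induction l generalizing acc with
  | nil => rfl
  | cons c rest ih =>
    simp only [List.foldl_cons, hall c List.mem_cons_self]
    apply ih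
    exact fun c' hc' => hall c' (List.mem_cons_of_mem _ hc')

theorem stepB_nil (xx : Int) : stepB xx [] = [] := rfl

theorem spec_nil (bs : List (List Int)) : spec [] bs = none := by
  unfold spec
  apply gmin_fold_none
  intro bb _
  by_cases hb : bb = []
  · simp [hb]
  · rw [if_neg hb]
    exact W_none [] bb (covers_nil_of_ne bb hb)

theorem spec_cons (xx : Int) (xs : List Int) (bs : List (List Int)) (h : [xx] ∉ bs) :
    spec (xx :: xs) bs = (spec xs (bs.map (stepB xx))).map (· + 1) := by
  unfold spec
  rw [List.foldl_map]
  have := gmin_fold_map (fun k => k + 1) (by intro a b; simp) bs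
    (fun bb => if stepB xx bb = [] then none else W xs (stepB xx bb))
    (fun bb => if bb = [] then none else W (xx :: xs) bb)
    ?_ none
  · exact this
  · intro bb hbb
    show (if bb = [] then none else W (xx :: xs) bb)
      = Option.map (fun k => k + 1) (if stepB xx bb = [] then none else W xs (stepB xx bb))
    by_cases hb : bb = []
    · subst hb
      simp [stepB_nil]
    · have hbx : bb ≠ [xx] := fun he => h (he ▸ hbb)
      obtain ⟨hw, hne⟩ := W_shift xx xs bb hb hbx
      rw [if_neg hb, if_neg hne, hw]

theorem spec_bingo (xx : Int) (xs : List Int) (bs : List (List Int)) (h : [xx] ∈ bs) :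
    spec (xx :: xs) bs = some 1 := by
  unfold spec
  apply gmin_fold_one
  · intro bb _ k hk
    by_cases hb : bb = []
    · simp [hb] at hk
    · rw [if_neg hb] at hk
      exact W_pos _ bb hb k hk
  · intro m hm; cases hm
  · left
    refine ⟨[xx], h, ?_⟩
    rw [if_neg (by simp), W_hit]

theorem fooLoop_spec (x : List Int) (i : Int) (bs : List (List Int)) :
    fooLoop x i bs = (spec x bs).map (fun k => i + (k : Int)) := by
  induction x generalizing i bs with
  | nil => simp [fooLoop, spec_nil]
  | cons xx xs ih =>
    simp only [fooLoop]
    cases hin : fooInner xx bs with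
    | none =>
      have hmem := (fooInner_none_iff xx bs).mp hin
      rw [spec_bingo xx xs bs hmem]
      simp
    | some bs' =>
      have hnm : [xx] ∉ bs := fun hmem => by
        rw [(fooInner_none_iff xx bs).mpr hmem] at hin; cases hin
      have hbs' : bs' = bs.map (stepB xx) := by
        have := fooInner_some xx bs hnm
        rw [this] at hin
        injection hin with h'
        exact h'.symm
      show fooLoop xs (i + 1) bs' = (spec (xx :: xs) bs).map (fun k => i + (k : Int))
      rw [ih (i + 1) bs', spec_cons xx xs bs hnm, hbs']
      cases spec xs (bs.map (stepB xx)) with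
      | none => simp
      | some k =>
        simp
        push_cast
        ring

theorem enum_occ (v : Int) (x : List Int) (s : Int) :
    (((PySem.List.enumerate x s).map Prod.swap).filter (fun p => p.1 == v)).map (·.2)
      = (occL v x).map (fun (j : Nat) => (j : Int) + s) := by
  induction x generalizing s with
  | nil => simp [PySem.List.enumerate, occL]
  | cons y ys ih =>
    rw [PySem.List.enumerate_cons]
    simp only [List.map_cons, Prod.swap_prod_mk, List.filter_cons]
    by_cases h : y = v
    · subst h
      simp only [beq_self_eq_true, if_pos, occL, List.map_cons, List.map_map]
      rw [ih (s + 1)]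
      congr 1
      · simp
      · refine List.map_congr_left ?_
        intro j _
        simp only [Function.comp]
        push_cast
        ring
    · have hbeq : (y == v) = false := by simp [h]
      rw [hbeq]
      simp only [Bool.false_eq_true, if_false, occL, if_neg h, List.map_map]
      rw [ih (s + 1)]
      refine List.map_congr_left ?_
      intro j _
      simp only [Function.comp]
      push_cast
      ring

theorem altPos_getD (x : List Int) (v : Int) :
    (altPos x).getD v [] = (occL v x).map (fun (j : Nat) => (j : Int)) := by
  have hfold : altPos x = ((PySem.List.enumerate x 0).map Prod.swap).foldl
      (fun d q => d.modify q.1 [] (· ++ [q.2])) PySem.Dict.empty := by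
    rw [List.foldl_map]
    rfl
  rw [hfold, PySem.Dict.getD_foldl_modify_append, enum_occ v x 0]
  simp

theorem cntOf_getD (pre : List Int) (v : Int) :
    (cntOf pre).getD v 0 = (pre.count v : Int) := by
  unfold cntOf
  rw [PySem.Dict.getD_foldl_insert_add_one]
  simp

theorem cntOf_append (pre : List Int) (v : Int) :
    cntOf (pre ++ [v]) = (cntOf pre).insert v ((cntOf pre).getD v 0 + 1) := by
  simp [cntOf, List.foldl_append]

theorem altBoard_stop (x : List Int) (v : Int) (rest pre : List Int) (last : Int)
    (h : x.count v ≤ pre.count v) :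
    altBoard (altPos x) (v :: rest) (cntOf pre) last = none := by
  simp only [altBoard]
  rw [cntOf_getD, altPos_getD, PySem.List.len_eq]
  rw [if_pos]
  simp only [List.length_map, occL_length]
  exact_mod_cast h

theorem altBoard_go (x : List Int) (v : Int) (rest pre : List Int) (last : Int)
    (h : pre.count v < x.count v) (j : Nat) (hj : (occL v x)[pre.count v]? = some j) :
    altBoard (altPos x) (v :: rest) (cntOf pre) last
      = altBoard (altPos x) rest (cntOf (pre ++ [v]))
          (if (j : Int) > last then (j : Int) else last) := by
  simp only [altBoard]
  rw [cntOf_getD, altPos_getD, PySem.List.len_eq]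
  rw [if_neg (by simp only [List.length_map, occL_length]; exact_mod_cast not_le.mpr h)]
  rw [PySem.List.pyGetD_natCast]
  rw [List.getD_eq_getElem?_getD, List.getElem?_map, hj]
  rw [cntOf_append, cntOf_getD]
  rfl

theorem occL_get_some (x : List Int) (v : Int) (pre : List Int)
    (h : pre.count v < x.count v) :
    ∃ j, (occL v x)[pre.count v]? = some j := by
  have hlt : pre.count v < (occL v x).length := by rw [occL_length]; exact h
  exact ⟨(occL v x)[pre.count v], List.getElem?_eq_getElem hlt⟩

theorem altBoard_none_iff (x : List Int) (rest : List Int) :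
    ∀ (pre : List Int) (last : Int),
    (altBoard (altPos x) rest (cntOf pre) last = none
      ↔ ∃ v ∈ rest, x.count v < pre.count v + rest.count v) := by
  induction rest with
  | nil => intro pre last; simp [altBoard]
  | cons v r ih =>
    intro pre last
    by_cases hstop : x.count v ≤ pre.count v
    · rw [altBoard_stop x v r pre last hstop]
      simp only [true_iff]
      exact ⟨v, List.mem_cons_self, by simp [List.count_cons]; omega⟩
    · push_neg at hstop
      obtain ⟨j, hj⟩ := occL_get_some x v pre hstop
      rw [altBoard_go x v r pre last hstop j hj, ih]
      constructor
      · rintro ⟨w, hw, hcnt⟩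
        refine ⟨w, List.mem_cons_of_mem _ hw, ?_⟩
        by_cases hwv : w = v
        · subst hwv
          simp [List.count_append, List.count_cons] at hcnt ⊢
          omega
        · simp [List.count_append, List.count_cons, hwv, Ne.symm hwv] at hcnt ⊢
          omega
      · rintro ⟨w, hw, hcnt⟩
        rcases List.mem_cons.mp hw with he | hmem
        · subst he
          by_cases hvr : w ∈ r
          · refine ⟨w, hvr, ?_⟩
            simp [List.count_append, List.count_cons] at hcnt ⊢
            omega
          · exfalso
            have : r.count w = 0 := List.count_eq_zero.mpr hvr
            simp [List.count_cons, this] at hcnt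
            omega
        · refine ⟨w, hmem, ?_⟩
          by_cases hwv : w = v
          · subst hwv
            simp [List.count_append, List.count_cons] at hcnt ⊢
            omega
          · simp [List.count_append, List.count_cons, hwv, Ne.symm hwv] at hcnt ⊢
            omega

theorem altBoard_some (x : List Int) (rest : List Int) :
    ∀ (pre : List Int) (last L : Int),
    altBoard (altPos x) rest (cntOf pre) last = some L → ∀ (k : Nat),
    (L < (k : Int) ↔ last < (k : Int) ∧
      ∀ v ∈ rest, pre.count v + rest.count v ≤ (x.take k).count v) := by
  induction rest with
  | nil =>
    intro pre last L h k
    simp [altBoard] at h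
    subst h
    simp
  | cons v r ih =>
    intro pre last L h k
    by_cases hstop : x.count v ≤ pre.count v
    · rw [altBoard_stop x v r pre last hstop] at h; cases h
    · push_neg at hstop
      obtain ⟨j, hj⟩ := occL_get_some x v pre hstop
      rw [altBoard_go x v r pre last hstop j hj] at h
      have hih := ih (pre ++ [v]) _ L h k
      have hocc := occL_lt_iff v x (pre.count v) j hj k
      rw [hih]
      have hlast : ((if (j : Int) > last then (j : Int) else last) < (k : Int))
          ↔ (last < (k : Int) ∧ j < k) := by
        split <;> constructor <;> intro hh <;> first
          | (constructor <;> omega)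
          | omega
      rw [hlast]
      constructor
      · rintro ⟨⟨hl, hjk⟩, hall⟩
        refine ⟨hl, ?_⟩
        intro w hw
        rcases List.mem_cons.mp hw with he | hmem
        · subst he
          by_cases hvr : w ∈ r
          · have := hall w hvr
            simp [List.count_append, List.count_cons] at this ⊢
            omega
          · have : r.count w = 0 := List.count_eq_zero.mpr hvr
            simp [List.count_cons, this]
            omega
        · by_cases hwv : w = v
          · subst hwv
            by_cases hvr : w ∈ r
            · have := hall w hvr
              simp [List.count_append, List.count_cons] at this ⊢
              omega
            · have : r.count w = 0 := List.count_eq_zero.mpr hvr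
              simp [List.count_cons, this]
              omega
          · have := hall w hmem
            simp [List.count_append, List.count_cons, hwv, Ne.symm hwv] at this ⊢
            omega
      · rintro ⟨hl, hall⟩
        have hv := hall v List.mem_cons_self
        simp [List.count_cons] at hv
        refine ⟨⟨hl, ?_⟩, ?_⟩
        · rw [hocc]; omega
        · intro w hw
          by_cases hwv : w = v
          · subst hwv
            simp [List.count_append, List.count_cons]
            omega
          · have := hall w (List.mem_cons_of_mem _ hw)
            simp [List.count_append, List.count_cons, hwv, Ne.symm hwv] at this ⊢
            omega

theorem altBoard_W (x bb : List Int) (h : bb ≠ []) :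
    (match altBoard (altPos x) bb PySem.Dict.empty (-1) with
      | none => (none : Option Int)
      | some last => some (last + 1))
      = (W x bb).map (fun (k : Nat) => (k : Int)) := by
  obtain ⟨w, bb', rfl⟩ : ∃ w bb', bb = w :: bb' := by
    cases bb with
    | nil => exact absurd rfl h
    | cons w bb' => exact ⟨w, bb', rfl⟩
  set bb := w :: bb' with hbb
  have hempty : PySem.Dict.empty = cntOf [] := rfl
  rw [hempty]
  cases halt : altBoard (altPos x) bb (cntOf []) (-1) with
  | none =>
    obtain ⟨v, hv, hcnt⟩ := (altBoard_none_iff x bb [] (-1)).mp halt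
    simp only [List.count_nil, Nat.zero_add] at hcnt
    have hcov : covers bb x = false := by
      by_contra hc
      have := (covers_iff bb x).mp (by revert hc; cases covers bb x <;> simp)
      have := this v hv
      omega
    rw [W_none x bb hcov]
    rfl
  | some L =>
    have hsome := altBoard_some x bb [] (-1) L halt
    have hL0 : 0 ≤ L := by
      by_contra hneg
      have := (hsome 0).mp (by omega)
      obtain ⟨-, hall⟩ := this
      have := hall w List.mem_cons_self
      simp [hbb] at this
    have hnn : ¬ ∃ v ∈ bb, x.count v < [].count v + bb.count v := by
      intro hex
      rw [← altBoard_none_iff x bb [] (-1)] at hex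
      rw [halt] at hex
      cases hex
    push_neg at hnn
    simp only [List.count_nil, Nat.zero_add] at hnn
    have hKdef : ((L.toNat + 1 : Nat) : Int) = L + 1 := by omega
    set K : Nat := L.toNat + 1 with hK
    have hLK : L < (K : Int) := by omega
    have hcovK : covers bb (x.take K) = true := by
      rw [covers_iff]
      intro v hv
      have := ((hsome K).mp hLK).2 v hv
      simpa using this
    have hmin : ∀ j < K, covers bb (x.take j) = false := by
      intro j hj
      by_contra hc
      have hcv := (covers_iff bb (x.take j)).mp (by revert hc; cases covers bb (x.take j) <;> simp)
      have : L < (j : Int) := (hsome j).mpr ⟨by omega, fun v hv => by simpa using hcv v hv⟩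
      omega
    have hKlen : K ≤ x.length := by
      have : L < (x.length : Int) := (hsome x.length).mpr
        ⟨by omega, fun v hv => by simpa [List.take_length] using hnn v hv⟩
      omega
    have hW : W x bb = some K :=
      find?_range_eq_some_of _ K (x.length + 1) (by omega) hcovK hmin
    rw [hW]
    simp only [Option.map_some]
    rw [← hKdef]

theorem foo_alt_spec (x : List Int) (b : List (List Int)) :
    foo_alt x b = (spec x b).map (fun (k : Nat) => (k : Int)) := by
  have hbody : foo_alt x b = b.foldl (fun best bb => gmin best
      (if bb = [] then none
       else match altBoard (altPos x) bb PySem.Dict.empty (-1) with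
            | none => none
            | some last => some (last + 1))) none := by
    unfold foo_alt
    apply List.foldl_ext
    intro best bb _
    by_cases hb : bb = []
    · simp [hb, gmin]
    · rw [if_neg hb, if_neg hb]
      cases altBoard (altPos x) bb PySem.Dict.empty (-1) with
      | none => rfl
      | some last => cases best <;> rfl
  rw [hbody]
  unfold spec
  have := gmin_fold_map (fun (k : Nat) => (k : Int)) (by intro a b; simp) b
    (fun bb => if bb = [] then none else W x bb)
    (fun bb => if bb = [] then none
       else match altBoard (altPos x) bb PySem.Dict.empty (-1) with
            | none => none
            | some last => some (last + 1))
    ?_ none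
  · simpa using this
  · intro bb _
    by_cases hb : bb = []
    · simp [hb]
    · show (if bb = [] then none
         else match altBoard (altPos x) bb PySem.Dict.empty (-1) with
              | none => none
              | some last => some (last + 1))
        = Option.map (fun (k : Nat) => (k : Int)) (if bb = [] then none else W x bb)
      rw [if_neg hb, if_neg hb, altBoard_W x bb hb]

-- ===== VERDICT (by name: the statement is the Claim_ definition above) =====
theorem foo_spec : Claim_equal_foo := by
  intro x b _
  unfold Spec_foo foo
  rw [fooLoop_spec, foo_alt_spec]
  simp
  cases spec x b <;> rfl
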